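-- pv_equiv track=rewrite | github.com/acaptainb/CSCI-141 | Lab/muudle.py | muddle
-- ===== SOURCE A (Python) =====
-- def muddle(s, n, keyword):
--     new_str = ""
--     for ch in s:
--         if ch in keyword:
--             num = ord(ch)
--             num += 110 + n
--             new_str += chr(num)
--         else:
--             num = ord(ch)
--             num += n
--             new_str += chr(num)
--     return new_str
-- ===== SOURCE B (Python) =====
-- def muddle(s, n, keyword):
--     # Build a code-point translation table once over s's characters, then
--     # delegate the rewrite to a single str.translate pass.
--     table = {ord(ch): ord(ch) + (110 + n if ch in keyword else n) for ch in s}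
--     return s.translate(table)
-- ===== Notes on version B (the rewrite author's own statement) =====
-- stated objective: idiomatic
-- what changed: Instead of appending shifted characters one by one in an explicit loop with string concatenation, B builds a code-point translation table (a dict keyed by ord(ch)) in one comprehension and delegates the whole rewrite to a single str.translate pass.
-- outside the precondition, e.g. on muddle('a', -200, ''): A raises ValueError, B raises ValueError
import Mathlib
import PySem

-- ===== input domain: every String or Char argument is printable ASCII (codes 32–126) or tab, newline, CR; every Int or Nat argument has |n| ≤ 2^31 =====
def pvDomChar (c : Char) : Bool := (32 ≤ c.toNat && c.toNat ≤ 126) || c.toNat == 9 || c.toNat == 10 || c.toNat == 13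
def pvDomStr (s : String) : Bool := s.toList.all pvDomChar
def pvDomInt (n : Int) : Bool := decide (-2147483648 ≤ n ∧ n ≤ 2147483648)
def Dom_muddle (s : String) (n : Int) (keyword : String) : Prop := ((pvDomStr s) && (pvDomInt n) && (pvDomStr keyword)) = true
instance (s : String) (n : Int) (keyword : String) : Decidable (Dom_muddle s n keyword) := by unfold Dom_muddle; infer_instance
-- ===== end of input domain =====

-- B changes the structure only: one-pass translation table + a single translate pass (no speed claim).
-- ===== PORT A =====
-- A: loop over s, append chr(ord(ch) + 110 + n) if ch in keyword else chr(ord(ch) + n).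
-- 'ch in keyword' for a single character is character membership in keyword.
def muddle (s : String) (n : Int) (keyword : String) : String :=
  String.mk (s.toList.foldl (fun new_str ch =>
    if keyword.toList.contains ch then
      new_str ++ [Char.ofNat ((ch.toNat : Int) + (110 + n)).toNat]
    else
      new_str ++ [Char.ofNat ((ch.toNat : Int) + n).toNat]) [])

-- ===== PORT B =====
-- B: build table = {ord(ch): ord(ch) + (110 + n if ch in keyword else n) for ch in s},
-- then s.translate(table): each char is replaced by chr(table[ord(ch)]) when present, kept otherwise.
def muddle_alt (s : String) (n : Int) (keyword : String) : String :=
  let table : PySem.Dict Int Int :=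
    s.toList.foldl (fun d ch =>
      d.insert (ch.toNat : Int)
        ((ch.toNat : Int) + (if keyword.toList.contains ch then 110 + n else n)))
      PySem.Dict.empty
  String.mk (s.toList.map (fun ch =>
    match table.get? (ch.toNat : Int) with
    | some v => Char.ofNat v.toNat
    | none => ch))

-- ===== PRECONDITION & SPEC =====
-- Pre_ excludes inputs where Python's chr raises (shifted code < 0 or > 0x10FFFF: A raises ValueError/
-- OverflowError, B likewise) and, additionally, inputs whose output would contain a UTF-16 surrogate
-- code point (0xD800–0xDFFF): there both Pythons return the same surrogate string, but a Lean Char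
-- cannot represent it, so the return value leaves the declared type.
def Pre_muddle (s : String) (n : Int) (keyword : String) : Prop :=
  (s.toList.all (fun ch =>
    let c : Int := (ch.toNat : Int) + n + (if keyword.toList.contains ch then 110 else 0)
    (decide (0 ≤ c) && decide (c < 55296)) || (decide (57344 ≤ c) && decide (c < 1114112)))) = true
instance (s : String) (n : Int) (keyword : String) : Decidable (Pre_muddle s n keyword) := by
  unfold Pre_muddle; infer_instance

def pvWitness_muddle : String × Int × String := ("ab", 5, "b")

def Spec_muddle (s : String) (n : Int) (keyword : String) (out : String) : Prop := out = muddle_alt s n keyword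
instance (s : String) (n : Int) (keyword : String) (out : String) : Decidable (Spec_muddle s n keyword out) := by unfold Spec_muddle; infer_instance

-- ===== CLAIM (what is proved, stated in full; the proofs are below) =====
def Claim_equal_muddle : Prop := ∀ (s : String) (n : Int) (keyword : String), Dom_muddle s n keyword → Pre_muddle s n keyword → Spec_muddle s n keyword (muddle s n keyword)

-- ===== LEMMAS AND PROOFS =====

-- keys not inserted by the fold are untouched
theorem tbl_get_untouched (F : Char → Int) (l : List Char) (d : PySem.Dict Int Int) (y : Int)
    (h : ∀ a ∈ l, (a.toNat : Int) ≠ y) :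
    (l.foldl (fun d a => d.insert (a.toNat : Int) (F a)) d).get? y = d.get? y := by
  induction l generalizing d with
  | nil => rfl
  | cons a t ih =>
    simp only [List.foldl_cons]
    rw [ih _ (fun b hb => h b (List.mem_cons_of_mem a hb)),
        PySem.Dict.get?_insert_of_ne _ _ ((h a List.mem_cons_self).symm)]

-- any character of the folded list is found in the table, with the value the fold assigns it
theorem tbl_get (F : Char → Int) (l : List Char) (d : PySem.Dict Int Int) (ch : Char)
    (h : ch ∈ l) :
    (l.foldl (fun d a => d.insert (a.toNat : Int) (F a)) d).get? (ch.toNat : Int) = some (F ch) := by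
  induction l generalizing d with
  | nil => simp at h
  | cons a t ih =>
    simp only [List.foldl_cons]
    by_cases hm : ch ∈ t
    · exact ih _ hm
    · have hca : ch = a := by
        rcases List.mem_cons.mp h with h1 | h2
        · exact h1
        · exact absurd h2 hm
      subst hca
      rw [tbl_get_untouched F t _ _ (fun b hb hby => hm (by
        have : b = ch := Char.ext (by
          have : b.toNat = ch.toNat := by exact_mod_cast hby
          exact UInt32.toNat_inj.mp this)
        exact this ▸ hb))]
      exact PySem.Dict.get?_insert_self _ _ _

theorem muddle_eq (s : String) (n : Int) (keyword : String) :
    muddle s n keyword = muddle_alt s n keyword := by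
  unfold muddle muddle_alt
  simp only []
  congr 1
  have hfold : ∀ (l : List Char),
      l.foldl (fun new_str ch =>
        if keyword.toList.contains ch then
          new_str ++ [Char.ofNat ((ch.toNat : Int) + (110 + n)).toNat]
        else
          new_str ++ [Char.ofNat ((ch.toNat : Int) + n).toNat]) []
      = l.map (fun ch =>
          if keyword.toList.contains ch then
            Char.ofNat ((ch.toNat : Int) + (110 + n)).toNat
          else
            Char.ofNat ((ch.toNat : Int) + n).toNat) := by
    intro l
    rw [show (fun (new_str : List Char) (ch : Char) =>
          if keyword.toList.contains ch then
            new_str ++ [Char.ofNat ((ch.toNat : Int) + (110 + n)).toNat]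
          else
            new_str ++ [Char.ofNat ((ch.toNat : Int) + n).toNat])
        = (fun new_str ch => new_str ++
            [if keyword.toList.contains ch then
                Char.ofNat ((ch.toNat : Int) + (110 + n)).toNat
              else Char.ofNat ((ch.toNat : Int) + n).toNat]) from by
          funext acc ch; split <;> rfl]
    rw [PySem.List.foldl_append_eq_flatMap, List.nil_append]
    induction l with
    | nil => rfl
    | cons a t ih => simp only [List.flatMap_cons, List.map_cons, ih, List.singleton_append]
  rw [hfold]
  apply List.map_congr_left
  intro ch hch
  rw [tbl_get (fun ch => (ch.toNat : Int) +
        (if keyword.toList.contains ch then 110 + n else n)) s.toList PySem.Dict.empty ch hch]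
  by_cases h : ch ∈ keyword.toList <;> simp [h]

-- ===== VERDICT (by name: the statement is the Claim_ definition above) =====
theorem muddle_spec : Claim_equal_muddle := by
  intro s n keyword _ _
  unfold Spec_muddle
  exact muddle_eq s n keyword
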